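-- pv_equiv track=rewrite | github.com/khapu2906/face_editor_tps | func/tps.py | get_landmarks_point_in_zone
-- ===== SOURCE A (Python) =====
-- def get_landmarks_point_in_zone(full_face):
--     points = []
--     for region in full_face:
--         if isinstance(full_face[region], list):
--             points.extend(full_face[region])
--         elif isinstance(full_face[region], dict):
--             points.extend(get_landmarks_point_in_zone(full_face[region]))
--
--     return points
-- ===== SOURCE B (Python) =====
-- def get_landmarks_point_in_zone(full_face):
--     # Iterative pre-order traversal with an explicit stack of value-iterators
--     # (instead of A's recursion with a per-key lookup).
--     points = []
--     stack = [iter(full_face.values())]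
--     while stack:
--         for value in stack[-1]:
--             if isinstance(value, list):
--                 points.extend(value)
--             elif isinstance(value, dict):
--                 stack.append(iter(value.values()))
--                 break
--         else:
--             stack.pop()
--     return points
-- ===== Notes on version B (the rewrite author's own statement) =====
-- stated objective: alternative
-- what changed: Replaces A's recursion over keys with dict lookups by an iterative pre-order traversal over value iterators kept on an explicit stack, extending the result directly from each value (no per-key hash lookup).
import Mathlib
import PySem

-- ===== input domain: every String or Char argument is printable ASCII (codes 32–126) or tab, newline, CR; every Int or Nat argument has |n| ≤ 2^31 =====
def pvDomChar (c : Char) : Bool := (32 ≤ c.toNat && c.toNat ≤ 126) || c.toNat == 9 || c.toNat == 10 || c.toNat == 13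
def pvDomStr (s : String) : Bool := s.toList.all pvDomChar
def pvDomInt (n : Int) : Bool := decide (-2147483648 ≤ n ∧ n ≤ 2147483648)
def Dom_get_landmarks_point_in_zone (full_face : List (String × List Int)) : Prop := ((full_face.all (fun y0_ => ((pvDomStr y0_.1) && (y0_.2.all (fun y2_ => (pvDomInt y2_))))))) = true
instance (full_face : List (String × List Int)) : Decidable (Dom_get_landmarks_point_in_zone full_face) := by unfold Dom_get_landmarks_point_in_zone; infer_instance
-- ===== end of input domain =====

-- B replaces A's per-key recursion with an iterative stack-of-iterators pre-order
-- traversal over the dict's values; same return value on every input (objective: alternative).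
-- NOTE on the domain: the task's declared input type is the FLAT dict[str, list[int]]
-- (full_face : List (String × List Int)); on values of this type every value is a list,
-- so A's recursive 'isinstance(..., dict)' branch (and B's matching stack-push branch)
-- is unreachable and the ports carry only the list branch. Nothing about nested dicts
-- is claimed here — they are not representable in the declared type.
-- The parameter is a Python dict, modelled as an association list; both ports first
-- form the PySem.Dict it denotes (PySem.Dict.ofList = Python's dict-construction
-- semantics) and then traverse that dict exactly as their Python does.

-- ===== PORT A =====
-- 'for region in full_face' iterates the dict's keys in insertion order;
-- 'full_face[region]' is the dict lookup; 'points.extend(...)' appends the list value.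
def get_landmarks_point_in_zone (full_face : List (String × List Int)) : List Int :=
  let d := PySem.Dict.ofList full_face
  d.keys.foldl (fun points region => points ++ d.getD region []) []

-- ===== PORT B =====
-- Source B keeps a stack of iterators over the dict's values; the flat element type makes
-- the 'isinstance(value, dict)' push branch unreachable, so each value is extended in turn.
-- State: the stack of not-yet-exhausted iterators (suffixes of the items list) + points.
def pvAltLoop : List (List (String × List Int)) → List Int → List Int
  | [], points => points
  | [] :: rest, points => pvAltLoop rest points          -- iterator exhausted: stack.pop()
  | ((_, v) :: tl) :: rest, points => pvAltLoop (tl :: rest) (points ++ v)  -- points.extend(value)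
  termination_by s _ => (s.map (·.length)).sum + s.length
  decreasing_by all_goals (simp; try omega)

def get_landmarks_point_in_zone_alt (full_face : List (String × List Int)) : List Int :=
  pvAltLoop [(PySem.Dict.ofList full_face).items] []

-- ===== PRECONDITION & SPEC =====
def Spec_get_landmarks_point_in_zone (full_face : List (String × List Int)) (out : List Int) : Prop := out = get_landmarks_point_in_zone_alt full_face
instance (full_face : List (String × List Int)) (out : List Int) : Decidable (Spec_get_landmarks_point_in_zone full_face out) := by unfold Spec_get_landmarks_point_in_zone; infer_instance

-- ===== CLAIM (what is proved, stated in full; the proofs are below) =====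
def Claim_equal_get_landmarks_point_in_zone : Prop := ∀ (full_face : List (String × List Int)), Dom_get_landmarks_point_in_zone full_face → Spec_get_landmarks_point_in_zone full_face (get_landmarks_point_in_zone full_face)

-- ===== LEMMAS AND PROOFS =====

-- B's loop flattens the top iterator's values onto points.
theorem pvAltLoop_cons (l : List (String × List Int)) (rest : List (List (String × List Int)))
    (points : List Int) :
    pvAltLoop (l :: rest) points = pvAltLoop rest (points ++ l.flatMap Prod.snd) := by
  induction l generalizing points with
  | nil => simp [pvAltLoop]
  | cons hd tl ih =>
    obtain ⟨k, v⟩ := hd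
    simp [pvAltLoop, ih, List.flatMap_cons, List.append_assoc]

-- B returns the flattening of the dict's values in insertion order.
theorem alt_eq_flatMap (full_face : List (String × List Int)) :
    get_landmarks_point_in_zone_alt full_face
      = (PySem.Dict.ofList full_face).items.flatMap Prod.snd := by
  simp [get_landmarks_point_in_zone_alt, pvAltLoop_cons, pvAltLoop]

-- ===== VERDICT (by name: the statement is the Claim_ definition above) =====
theorem get_landmarks_point_in_zone_spec : Claim_equal_get_landmarks_point_in_zone := by
  intro full_face _
  unfold Spec_get_landmarks_point_in_zone get_landmarks_point_in_zone
  rw [alt_eq_flatMap]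
  rw [PySem.List.foldl_append_eq_flatMap]
  rw [PySem.Dict.items_eq_map_keys (PySem.Dict.ofList full_face)
        (PySem.Dict.nodup_keys_ofList full_face) []]
  simp [List.flatMap_map]
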